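-- pv_equiv track=rewrite | github.com/AnReu/selma_code | backend/search.py | __concat_with_delimiter
-- ===== SOURCE A (Python) =====
-- def __concat_with_delimiter(data):
--     delimiter = ''
--     results = []
--     for index, element in enumerate(data):
--         if index % 4 == 0:
--             results.append(element)
--         if index % 4 == 1:
--             delimiter = element
--         if index % 4 == 2:
--             results.append(delimiter + element + delimiter)
--     return results
-- ===== SOURCE B (Python) =====
-- def __concat_with_delimiter(data):
--     data = list(data)
--     firsts = data[0::4]
--     wrapped = [d + e + d for d, e in zip(data[1::4], data[2::4])]
--     results = []
--     for f, w in zip(firsts, wrapped):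
--         results += [f, w]
--     results += firsts[len(wrapped):]
--     return results
-- ===== Notes on version B (the rewrite author's own statement) =====
-- stated objective: alternative
-- what changed: Replaced A's stateful single pass (index % 4 dispatch with a carried delimiter variable) by a staged slice-and-combine: extract the three relevant columns with extended slices data[0::4], data[1::4], data[2::4], wrap the third column in the second elementwise, and interleave with the firsts plus a possible leftover first.
import Mathlib
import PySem

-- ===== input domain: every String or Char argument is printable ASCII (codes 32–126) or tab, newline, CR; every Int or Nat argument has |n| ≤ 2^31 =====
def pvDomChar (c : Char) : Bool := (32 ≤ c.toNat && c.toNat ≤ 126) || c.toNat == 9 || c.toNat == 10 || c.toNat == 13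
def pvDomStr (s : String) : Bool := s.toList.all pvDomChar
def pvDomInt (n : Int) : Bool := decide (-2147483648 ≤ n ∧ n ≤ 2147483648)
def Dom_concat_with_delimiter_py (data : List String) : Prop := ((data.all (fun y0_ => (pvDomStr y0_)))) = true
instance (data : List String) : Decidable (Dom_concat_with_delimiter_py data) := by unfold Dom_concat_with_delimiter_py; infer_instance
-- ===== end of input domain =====

-- B replaces A's stateful index-mod-4 single pass by staged extended slices data[0::4] / [1::4] / [2::4],
-- elementwise wrapping and an interleave (alternative decomposition; same cost); return values are identical.

-- ===== PORT A =====
-- the for-loop over enumerate(data), carrying index, delimiter and results exactly as A does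
def pvALoop (rest : List String) (i : Int) (delim : String) (res : List String) : List String :=
  match rest with
  | [] => res
  | e :: rest =>
    let res1 := if i % 4 = 0 then res ++ [e] else res
    let delim1 := if i % 4 = 1 then e else delim
    let res2 := if i % 4 = 2 then res1 ++ [delim1 ++ e ++ delim1] else res1
    pvALoop rest (i + 1) delim1 res2

def concat_with_delimiter_py (data : List String) : List String :=
  pvALoop data 0 "" []

-- ===== PORT B =====
-- Source B: firsts = data[0::4]; wrapped = [d+e+d for d,e in zip(data[1::4], data[2::4])];
-- interleave firsts with wrapped; append the leftover firsts[len(wrapped):]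
def concat_with_delimiter_py_alt (data : List String) : List String :=
  let firsts := (PySem.List.slice? data (some 0) none 4).getD []
  let col1 := (PySem.List.slice? data (some 1) none 4).getD []
  let col2 := (PySem.List.slice? data (some 2) none 4).getD []
  let wrapped := (col1.zip col2).map (fun p => p.1 ++ p.2 ++ p.1)
  let results := (firsts.zip wrapped).foldl (fun r p => r ++ [p.1, p.2]) []
  results ++ PySem.List.slice firsts (some (wrapped.length : Int)) none

-- ===== PRECONDITION & SPEC =====
def Spec_concat_with_delimiter_py (data : List String) (out : List String) : Prop := out = concat_with_delimiter_py_alt data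
instance (data : List String) (out : List String) : Decidable (Spec_concat_with_delimiter_py data out) := by unfold Spec_concat_with_delimiter_py; infer_instance

-- ===== CLAIM (what is proved, stated in full; the proofs are below) =====
def Claim_equal_concat_with_delimiter_py : Prop := ∀ (data : List String), Dom_concat_with_delimiter_py data → Spec_concat_with_delimiter_py data (concat_with_delimiter_py data)

-- ===== LEMMAS AND PROOFS =====

-- every fourth element, starting at the head (proof-side characterisation of xs[s::4])
def pvEvery4 {α : Type} : List α → List α
  | [] => []
  | [a] => [a]
  | [a, _] => [a]
  | [a, _, _] => [a]
  | a :: _ :: _ :: _ :: t => a :: pvEvery4 t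

lemma pvEvery4_cons_drop {α : Type} (a : α) (t : List α) :
    pvEvery4 (a :: t) = a :: pvEvery4 (t.drop 3) := by
  match t with
  | [] => simp [pvEvery4]
  | [_] => simp [pvEvery4]
  | [_, _] => simp [pvEvery4]
  | _ :: _ :: _ :: r => simp [pvEvery4]

-- closed recombination of the three columns (proof-side characterisation of B's combine phase)
def pvCombine (c0 c1 c2 : List String) : List String :=
  (c0.zip ((c1.zip c2).map (fun p => p.1 ++ p.2 ++ p.1))).flatMap (fun p => [p.1, p.2])
    ++ c0.drop ((c1.zip c2).map (fun p => p.1 ++ p.2 ++ p.1)).length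

lemma pvCore {α : Type} : ∀ (n : Nat) (ys : List α), ys.length ≤ n →
    List.filterMap (fun k => ys[4 * k]?) (List.range ((ys.length + 3) / 4)) = pvEvery4 ys := by
  intro n
  induction n with
  | zero =>
    intro ys h
    match ys with
    | [] => simp [pvEvery4]
    | _ :: _ => simp at h
  | succ n ih =>
    intro ys h
    match ys with
    | [] => simp [pvEvery4]
    | a :: t =>
      have hc : ((a :: t).length + 3) / 4 = ((t.drop 3).length + 3) / 4 + 1 := by
        simp; omega
      rw [hc, List.range_succ_eq_map, List.filterMap_cons, List.filterMap_map]
      have h0 : (a :: t)[4 * 0]? = some a := by simp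
      rw [h0]
      have hf : ((fun k => (a :: t)[4 * k]?) ∘ (fun k => k + 1)) =
          (fun k => (t.drop 3)[4 * k]?) := by
        funext k
        show (a :: t)[4 * (k + 1)]? = (t.drop 3)[4 * k]?
        rw [List.getElem?_drop]
        have h4 : 4 * (k + 1) = (3 + 4 * k) + 1 := by ring
        rw [h4, List.getElem?_cons_succ]
      rw [hf, ih (t.drop 3) (by simp at h ⊢; omega),
        pvEvery4_cons_drop]

lemma pvSlice4 {α : Type} (xs : List α) (s : Nat) :
    (PySem.List.slice? xs (some (s : Int)) none 4).getD [] = pvEvery4 (xs.drop s) := by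
  simp only [PySem.List.slice?, PySem.List.sliceIndices]
  norm_num
  have hnot : ¬ ((s : Int) < 0) := by omega
  simp only [if_neg hnot]
  by_cases hs : s ≤ xs.length
  · have hmin : min (s : Int) (xs.length : Int) = (s : Int) := by omega
    simp only [hmin]
    have hcount : (if (s : Int) < ↑xs.length then (((xs.length : Int) - ↑s + 4 - 1) / 4).toNat else 0)
        = ((xs.drop s).length + 3) / 4 := by
      rw [List.length_drop]
      split_ifs with h' <;> omega
    have hfun : (fun x : Nat => xs[((s : Int) + 4 * ↑x).toNat]?) = (fun k => (xs.drop s)[4 * k]?) := by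
      funext k
      have hidx : ((s : Int) + 4 * (k : Int)).toNat = s + 4 * k := by omega
      rw [hidx, List.getElem?_drop]
    rw [hfun, hcount]
    exact pvCore (xs.drop s).length _ le_rfl
  · have hmin : min (s : Int) (xs.length : Int) = (xs.length : Int) := by omega
    simp only [hmin, lt_irrefl, if_false]
    rw [List.drop_eq_nil_of_le (by omega)]
    simp [pvEvery4]

lemma pvCombine_eq (data : List String) :
    concat_with_delimiter_py_alt data
      = pvCombine (pvEvery4 data) (pvEvery4 (data.drop 1)) (pvEvery4 (data.drop 2)) := by
  have h0 : (PySem.List.slice? data (some 0) none 4).getD [] = pvEvery4 data := by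
    simpa using pvSlice4 data 0
  have h1 : (PySem.List.slice? data (some 1) none 4).getD [] = pvEvery4 (data.drop 1) := by
    simpa using pvSlice4 data 1
  have h2 : (PySem.List.slice? data (some 2) none 4).getD [] = pvEvery4 (data.drop 2) := by
    simpa using pvSlice4 data 2
  unfold concat_with_delimiter_py_alt pvCombine
  simp only [h0, h1, h2, PySem.List.slice_from_natCast]
  congr 1
  induction (pvEvery4 data).zip
      (((pvEvery4 (data.drop 1)).zip (pvEvery4 (data.drop 2))).map (fun p => p.1 ++ p.2 ++ p.1))
      using List.reverseRecOn with
  | nil => simp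
  | append_singleton l a ihl => simp [List.foldl_append, ihl]

lemma pvCombine_cons (e0 d e2 : String) (c0 c1 c2 : List String) :
    pvCombine (e0 :: c0) (d :: c1) (e2 :: c2)
      = e0 :: (d ++ e2 ++ d) :: pvCombine c0 c1 c2 := by
  simp [pvCombine]

lemma pvMain : ∀ (n : Nat) (data : List String), data.length ≤ n →
    ∀ (i : Int) (delim : String) (res : List String), i % 4 = 0 →
      pvALoop data i delim res
        = res ++ pvCombine (pvEvery4 data) (pvEvery4 (data.drop 1)) (pvEvery4 (data.drop 2)) := by
  intro n
  induction n with
  | zero =>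
    intro data hlen i delim res h
    match data with
    | [] => simp [pvALoop, pvEvery4, pvCombine]
    | _ :: _ => simp at hlen
  | succ n ih =>
    intro data hlen i delim res h
    have c00 := eq_true h
    have c01 := eq_false (show ¬ i % 4 = 1 by omega)
    have c02 := eq_false (show ¬ i % 4 = 2 by omega)
    have c10 := eq_false (show ¬ (i + 1) % 4 = 0 by omega)
    have c11 := eq_true (show (i + 1) % 4 = 1 by omega)
    have c12 := eq_false (show ¬ (i + 1) % 4 = 2 by omega)
    have c20 := eq_false (show ¬ (i + 1 + 1) % 4 = 0 by omega)
    have c21 := eq_false (show ¬ (i + 1 + 1) % 4 = 1 by omega)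
    have c22 := eq_true (show (i + 1 + 1) % 4 = 2 by omega)
    have c30 := eq_false (show ¬ (i + 1 + 1 + 1) % 4 = 0 by omega)
    have c31 := eq_false (show ¬ (i + 1 + 1 + 1) % 4 = 1 by omega)
    have c32 := eq_false (show ¬ (i + 1 + 1 + 1) % 4 = 2 by omega)
    match data with
    | [] => simp [pvALoop, pvEvery4, pvCombine]
    | [e0] =>
      simp only [pvALoop, c00, c01, c02, if_true, if_false]
      simp [pvEvery4, pvCombine]
    | [e0, d] =>
      simp only [pvALoop, c00, c01, c02, c10, c11, c12, if_true, if_false]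
      simp [pvEvery4, pvCombine]
    | [e0, d, e2] =>
      simp only [pvALoop, c00, c01, c02, c10, c11, c12, c20, c21, c22, if_true, if_false]
      simp [pvEvery4, pvCombine]
    | e0 :: d :: e2 :: x :: rest =>
      have hr : rest.length ≤ n := by simp at hlen; omega
      simp only [pvALoop, c00, c01, c02, c10, c11, c12, c20, c21, c22,
        c30, c31, c32, if_true, if_false]
      rw [ih rest hr (i + 1 + 1 + 1 + 1) d (res ++ [e0] ++ [d ++ e2 ++ d]) (by omega)]
      simp only [List.drop_succ_cons, List.drop_zero]
      rw [show (e0 :: d :: e2 :: x :: rest) = e0 :: (d :: e2 :: x :: rest) from rfl]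
      rw [pvEvery4_cons_drop e0, pvEvery4_cons_drop d, pvEvery4_cons_drop e2]
      simp only [List.drop_succ_cons, List.drop_zero]
      rw [pvCombine_cons]
      simp

-- ===== VERDICT (by name: the statement is the Claim_ definition above) =====
theorem concat_with_delimiter_py_spec : Claim_equal_concat_with_delimiter_py := by
  intro data _
  unfold Spec_concat_with_delimiter_py concat_with_delimiter_py
  rw [pvCombine_eq]
  exact pvMain data.length data le_rfl 0 "" [] rfl
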